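-- pv_equiv track=rewrite | github.com/Seojeil/Algorithm | Python/백준/Gold/12919. A와 B 2/A와 B 2.py | A_and_B
-- ===== SOURCE A (Python) =====
-- def A_and_B(current, target):
--     if current == target:
--         return True
--
--     if len(current) <= len(target):
--         return False
--
--     if current.endswith('A'):
--         if A_and_B(current[:-1], target):
--             return True
--
--     if current.startswith('B'):
--         if A_and_B(current[1:][::-1], target):
--             return True
--
--     return False
-- ===== SOURCE B (Python) =====
-- def A_and_B(current, target):
--     stack = [current]
--     while stack:
--         c = stack.pop()
--         if c == target:
--             return True
--         if len(c) <= len(target):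
--             continue
--         if c.endswith('A'):
--             stack.append(c[:-1])
--         if c.startswith('B'):
--             stack.append(c[1:][::-1])
--     return False
-- ===== Notes on version B (the rewrite author's own statement) =====
-- stated objective: alternative
-- what changed: The recursive DFS with early returns is replaced by an iterative DFS over an explicit LIFO stack of candidate strings; reachability is accumulated by the loop instead of the call stack.
import Mathlib
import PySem

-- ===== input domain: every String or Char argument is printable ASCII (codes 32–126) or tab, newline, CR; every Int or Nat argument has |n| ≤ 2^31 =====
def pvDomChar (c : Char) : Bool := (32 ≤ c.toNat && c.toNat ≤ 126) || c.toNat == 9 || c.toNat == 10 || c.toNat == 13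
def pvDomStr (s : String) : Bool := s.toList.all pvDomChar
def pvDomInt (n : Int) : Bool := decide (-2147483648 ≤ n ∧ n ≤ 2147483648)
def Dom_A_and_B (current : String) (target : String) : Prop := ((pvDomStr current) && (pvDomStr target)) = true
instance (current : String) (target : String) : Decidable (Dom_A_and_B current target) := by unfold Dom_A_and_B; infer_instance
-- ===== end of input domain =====

-- B replaces A's recursive DFS by an iterative DFS over an explicit stack (return value only; same worst-case cost).

-- ===== PORT A =====
-- Recursive DFS, transliterated on List Char (cur[:-1] = slice none (some (-1));
-- cur[1:][::-1] = (slice (some 1) none).reverse, exact by PySem.List.slice?_none_none_neg_one).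
def pvGoA (cur tgt : List Char) : Bool :=
  if cur = tgt then true
  else if cur.length ≤ tgt.length then false
  else if (if PySem.Chars.endswith cur ['A'] then
             pvGoA (PySem.List.slice cur none (some (-1))) tgt else false) then true
  else if (if PySem.Chars.startswith cur ['B'] then
             pvGoA (PySem.List.slice cur (some 1) none).reverse tgt else false) then true
  else false
termination_by cur.length
decreasing_by
  · simp only [PySem.List.slice_to_neg_one, List.length_dropLast]; omega
  · simp only [PySem.List.slice_from_one, List.length_reverse, List.length_tail]; omega

def A_and_B (current : String) (target : String) : Bool :=
  pvGoA current.toList target.toList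

-- ===== PORT B =====
-- Measure for the stack loop: each pop replaces one candidate of length L by at most
-- two candidates of length L-1.
def pvMeas (st : List (List Char)) : Nat := (st.map (fun s => 3 ^ s.length)).sum

-- Iterative DFS: head of the list is the top of the stack (Python pops/appends at the end).
def pvGoB (tgt : List Char) (stack : List (List Char)) : Bool :=
  match stack with
  | [] => false
  | c :: rest =>
    if c = tgt then true
    else if c.length ≤ tgt.length then pvGoB tgt rest
    else
      let rest1 := if PySem.Chars.endswith c ['A'] then c.dropLast :: rest else rest
      let rest2 := if PySem.Chars.startswith c ['B'] then c.tail.reverse :: rest1 else rest1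
      pvGoB tgt rest2
termination_by pvMeas stack
decreasing_by
  · simp only [pvMeas, List.map_cons, List.sum_cons]
    have : 0 < 3 ^ c.length := Nat.pow_pos (by omega)
    omega
  · simp only [pvMeas]
    have hL : 1 ≤ c.length := by omega
    have h3 : 3 ^ c.length = 3 * 3 ^ (c.length - 1) := by
      conv_lhs => rw [show c.length = (c.length - 1) + 1 from by omega]
      rw [pow_succ]; ring
    have hp : 0 < 3 ^ (c.length - 1) := Nat.pow_pos (by omega)
    split_ifs <;>
      simp only [List.map_cons, List.sum_cons, List.length_dropLast,
        List.length_reverse, List.length_tail] <;> omega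

def A_and_B_alt (current : String) (target : String) : Bool :=
  pvGoB target.toList [current.toList]

-- ===== PRECONDITION & SPEC =====
def Spec_A_and_B (current : String) (target : String) (out : Bool) : Prop := out = A_and_B_alt current target
instance (current : String) (target : String) (out : Bool) : Decidable (Spec_A_and_B current target out) := by unfold Spec_A_and_B; infer_instance

-- ===== CLAIM (what is proved, stated in full; the proofs are below) =====
def Claim_equal_A_and_B : Prop := ∀ (current : String) (target : String), Dom_A_and_B current target → Spec_A_and_B current target (A_and_B current target)

-- ===== LEMMAS AND PROOFS =====

-- The stack loop computes "some candidate on the stack reaches the target".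
theorem pvGoB_eq_any (tgt : List Char) (stack : List (List Char)) :
    pvGoB tgt stack = stack.any (fun c => pvGoA c tgt) := by
  fun_induction pvGoB tgt stack with
  | case1 => simp
  | case2 rest => simp only [List.any_cons]; rw [pvGoA.eq_def]; simp
  | case3 c rest hne hle ih =>
      simp only [List.any_cons, ih]
      rw [pvGoA.eq_def, if_neg hne, if_pos hle]
      simp
  | case4 c rest hne hle rest1 rest2 ih =>
      rw [ih, List.any_cons, pvGoA.eq_def, if_neg hne, if_neg hle]
      simp only [PySem.List.slice_to_neg_one, PySem.List.slice_from_one, rest2, rest1]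
      split_ifs <;> simp_all

-- ===== VERDICT (by name: the statement is the Claim_ definition above) =====
theorem A_and_B_spec : Claim_equal_A_and_B := by
  intro current target _
  unfold Spec_A_and_B A_and_B A_and_B_alt
  rw [pvGoB_eq_any]
  simp
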